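-- pv_equiv track=rewrite | github.com/kiteros/MPIK_PMTsim | quick_hist.py | makeTag
-- ===== SOURCE A (Python) =====
-- TAG_E = 1
--
-- TAG_MU = 2
--
-- TAG_MESON = 4
--
-- TAG_OTHER = 8
--
-- def makeTag(parts):
--     tag = 0
--     for p in parts:
--         if p < 4: tag |= TAG_E
--         elif p >= 5 and p < 7: tag |= TAG_MU
--         elif p >= 7 and p < 13: tag |= TAG_MESON
--         else: tag |= TAG_OTHER
--     return tag
-- ===== SOURCE B (Python) =====
-- TAG_E = 1
--
-- TAG_MU = 2
--
-- TAG_MESON = 4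
--
-- TAG_OTHER = 8
--
-- def makeTag(parts):
--     tag = 0
--     if any(p < 4 for p in parts):
--         tag |= TAG_E
--     if any(5 <= p < 7 for p in parts):
--         tag |= TAG_MU
--     if any(7 <= p < 13 for p in parts):
--         tag |= TAG_MESON
--     if any(not (p < 4 or 5 <= p < 7 or 7 <= p < 13) for p in parts):
--         tag |= TAG_OTHER
--     return tag
-- ===== Notes on version B (the rewrite author's own statement) =====
-- stated objective: alternative
-- what changed: Instead of one pass classifying each particle and OR-ing per element, B scans the list once per category with any(...) and sets each flag bit at most once.
import Mathlib
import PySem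

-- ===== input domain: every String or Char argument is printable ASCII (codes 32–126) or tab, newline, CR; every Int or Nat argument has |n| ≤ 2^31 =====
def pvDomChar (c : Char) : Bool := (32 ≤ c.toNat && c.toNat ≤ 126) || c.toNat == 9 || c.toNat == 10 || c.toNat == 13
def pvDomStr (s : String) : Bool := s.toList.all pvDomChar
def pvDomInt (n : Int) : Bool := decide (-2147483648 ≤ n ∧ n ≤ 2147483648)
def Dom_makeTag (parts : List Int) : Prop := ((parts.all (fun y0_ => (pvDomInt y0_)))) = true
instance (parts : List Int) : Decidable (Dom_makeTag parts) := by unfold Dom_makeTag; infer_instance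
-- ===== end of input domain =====

-- B replaces A's single classifying loop by one short-circuiting any-scan per category, OR-ing each flag bit at most once (alternative decomposition, same cost).

-- ===== PORT A =====
-- literal port of A: tag = 0; for p in parts: pick the first matching branch and OR its bit
def makeTag (parts : List Int) : Int :=
  parts.foldl
    (fun tag p =>
      if p < 4 then tag.lor (1:Int)
      else if 5 ≤ p ∧ p < 7 then tag.lor (2:Int)
      else if 7 ≤ p ∧ p < 13 then tag.lor (4:Int)
      else tag.lor (8:Int))
    0

-- ===== PORT B =====
-- port of Source B: four any(...) scans, one per category; OTHER is the exact complement of the first three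
def makeTag_alt (parts : List Int) : Int :=
  (((if parts.any (fun p => decide (p < 4)) then (1:Int) else 0).lor
  (if parts.any (fun p => decide (5 ≤ p ∧ p < 7)) then (2:Int) else 0)).lor
  (if parts.any (fun p => decide (7 ≤ p ∧ p < 13)) then (4:Int) else 0)).lor
  (if parts.any (fun p => !(decide (p < 4) || decide (5 ≤ p ∧ p < 7) || decide (7 ≤ p ∧ p < 13))) then (8:Int) else 0)

-- ===== PRECONDITION & SPEC =====
def Spec_makeTag (parts : List Int) (out : Int) : Prop := out = makeTag_alt parts
instance (parts : List Int) (out : Int) : Decidable (Spec_makeTag parts out) := by unfold Spec_makeTag; infer_instance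

-- ===== CLAIM (what is proved, stated in full; the proofs are below) =====
def Claim_equal_makeTag : Prop := ∀ (parts : List Int), Dom_makeTag parts → Spec_makeTag parts (makeTag parts)

-- ===== LEMMAS AND PROOFS =====

-- canonical value of the four flag bits
def tagVal (e m s o : Bool) : Int :=
  (((if e then (1:Int) else 0).lor (if m then (2:Int) else 0)).lor (if s then (4:Int) else 0)).lor (if o then (8:Int) else 0)

theorem tagVal_lor1 (e m s o : Bool) : (tagVal e m s o).lor (1:Int) = tagVal true m s o := by
  cases e <;> cases m <;> cases s <;> cases o <;> decide

theorem tagVal_lor2 (e m s o : Bool) : (tagVal e m s o).lor (2:Int) = tagVal e true s o := by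
  cases e <;> cases m <;> cases s <;> cases o <;> decide

theorem tagVal_lor4 (e m s o : Bool) : (tagVal e m s o).lor (4:Int) = tagVal e m true o := by
  cases e <;> cases m <;> cases s <;> cases o <;> decide

theorem tagVal_lor8 (e m s o : Bool) : (tagVal e m s o).lor (8:Int) = tagVal e m s true := by
  cases e <;> cases m <;> cases s <;> cases o <;> decide

theorem makeTag_foldl_tagVal (parts : List Int) (e m s o : Bool) :
    parts.foldl
      (fun tag p =>
        if p < 4 then tag.lor (1:Int)
        else if 5 ≤ p ∧ p < 7 then tag.lor (2:Int)
        else if 7 ≤ p ∧ p < 13 then tag.lor (4:Int)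
        else tag.lor (8:Int))
      (tagVal e m s o)
    = tagVal (e || parts.any (fun p => decide (p < 4)))
             (m || parts.any (fun p => decide (5 ≤ p ∧ p < 7)))
             (s || parts.any (fun p => decide (7 ≤ p ∧ p < 13)))
             (o || parts.any (fun p => !(decide (p < 4) || decide (5 ≤ p ∧ p < 7) || decide (7 ≤ p ∧ p < 13)))) := by
  induction parts generalizing e m s o with
  | nil => simp [tagVal]
  | cons p rest ih =>
    simp only [List.foldl_cons, List.any_cons]
    split_ifs with h1 h2 h3
    · rw [tagVal_lor1, ih]
      simp [h1, show ¬(5:Int) ≤ p by omega, show ¬(7:Int) ≤ p by omega, Bool.or_assoc]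
    · rw [tagVal_lor2, ih]
      simp [h1, h2.1, h2.2, show ¬(7:Int) ≤ p by omega, Bool.or_assoc]
    · rw [tagVal_lor4, ih]
      simp [h1, h2, h3, Bool.or_assoc]
    · rw [tagVal_lor8, ih]
      simp [h1, h2, h3, Bool.or_assoc]

theorem makeTag_alt_eq_tagVal (parts : List Int) :
    makeTag_alt parts
    = tagVal (parts.any (fun p => decide (p < 4)))
             (parts.any (fun p => decide (5 ≤ p ∧ p < 7)))
             (parts.any (fun p => decide (7 ≤ p ∧ p < 13)))
             (parts.any (fun p => !(decide (p < 4) || decide (5 ≤ p ∧ p < 7) || decide (7 ≤ p ∧ p < 13)))) := by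
  unfold makeTag_alt tagVal
  split_ifs <;> rfl

-- ===== VERDICT (by name: the statement is the Claim_ definition above) =====
theorem makeTag_spec : Claim_equal_makeTag := by
  intro parts _
  unfold Spec_makeTag makeTag
  have h0 : (0 : Int) = tagVal false false false false := by decide
  rw [h0, makeTag_foldl_tagVal, makeTag_alt_eq_tagVal]
  simp
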